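-- pv_equiv track=rewrite | github.com/systemadminbdofficials/ccparser | ccparser/formatter.py | mask_card_number
-- ===== SOURCE A (Python) =====
-- def mask_card_number(card_number: str, visible_digits: int = 4) -> str:
--     """
--     Mask a credit card number, showing only the last few digits.
--
--     Supports different card lengths:
--     - 16 digits (Visa, MasterCard, etc.): **** **** **** 1234
--     - 15 digits (AMEX): **** ****** *2345
--     - 14 digits (Diners Club): **** ****** 1234
--
--     Args:
--         card_number: The credit card number to mask.
--         visible_digits: Number of digits to show at the end (default: 4).
--
--     Returns:
--         The masked card number string.
--
--     Example:
--         >>> mask_card_number("4111111111111111")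
--         '**** **** **** 1111'
--         >>> mask_card_number("378282246310005")
--         '**** ****** *0005'
--     """
--     if not card_number:
--         return ""
--
--     # Clean any existing formatting
--     clean_number = "".join(c for c in card_number if c.isdigit())
--     length = len(clean_number)
--
--     if length < visible_digits:
--         return clean_number
--
--     # Get the visible portion
--     visible_part = clean_number[-visible_digits:]
--
--     # AMEX format: 4-6-5 with last 4 visible (1 masked in last group)
--     if length == 15:
--         return f"**** ****** *{visible_part}"
--
--     # Diners Club format: 4-6-4 with last 4 visible
--     if length == 14:
--         return f"**** ****** {visible_part}"
--
--     # Standard 16-digit format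
--     if length == 16:
--         return f"**** **** **** {visible_part}"
--
--     # Generic fallback for other lengths
--     masked_length = length - visible_digits
--     masked_groups = []
--     remaining_masked = masked_length
--
--     for i in range(0, length, 4):
--         group_size = min(4, length - i)
--         if remaining_masked >= group_size:
--             masked_groups.append("*" * group_size)
--             remaining_masked -= group_size
--         elif remaining_masked > 0:
--             masked_groups.append("*" * remaining_masked + clean_number[i + remaining_masked:i + group_size])
--             remaining_masked = 0
--         else:
--             masked_groups.append(clean_number[i:i + group_size])
--
--     return " ".join(masked_groups)
-- ===== SOURCE B (Python) =====
-- _PREFIX = {15: "**** ****** *", 14: "**** ****** ", 16: "**** **** **** "}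
--
--
-- def mask_card_number(card_number: str, visible_digits: int = 4) -> str:
--     if not card_number:
--         return ""
--     clean_number = "".join(c for c in card_number if c.isdigit())
--     length = len(clean_number)
--     if length < visible_digits:
--         return clean_number
--     prefix = _PREFIX.get(length)
--     if prefix is not None:
--         return prefix + clean_number[-visible_digits:]
--     masked_length = length - visible_digits
--     s = "*" * masked_length + clean_number[masked_length:]
--     return " ".join(s[i:i + 4] for i in range(0, length, 4))
-- ===== Notes on version B (the rewrite author's own statement) =====
-- stated objective: simpler
-- what changed: The generic fallback's stateful countdown loop (remaining_masked with a three-way branch per group) is replaced by building the masked string once ('*'*masked_length + tail) and chunking it into groups of 4, and the three length-specific format branches become a single prefix-table lookup.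
-- outside the precondition, e.g. on mask_card_number('123456', -1): A returns '**** **', B returns '**** ***'
import Mathlib
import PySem

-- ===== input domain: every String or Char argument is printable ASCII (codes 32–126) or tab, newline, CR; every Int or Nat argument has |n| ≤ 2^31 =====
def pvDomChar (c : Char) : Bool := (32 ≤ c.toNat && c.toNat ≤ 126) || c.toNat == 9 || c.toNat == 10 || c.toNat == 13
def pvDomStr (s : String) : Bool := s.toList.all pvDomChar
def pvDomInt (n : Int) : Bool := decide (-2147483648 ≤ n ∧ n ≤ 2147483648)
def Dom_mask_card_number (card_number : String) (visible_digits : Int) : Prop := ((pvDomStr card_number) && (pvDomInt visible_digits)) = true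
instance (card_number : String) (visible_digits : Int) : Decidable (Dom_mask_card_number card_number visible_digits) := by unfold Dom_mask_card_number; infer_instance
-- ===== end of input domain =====

-- B replaces A's stateful countdown masking loop by build-masked-string-then-chunk, and the
-- three special-format branches by a prefix-table lookup; same values for visible_digits ≥ 0.


-- ===== PORT A =====
-- one iteration of A's fallback loop body (state = (remaining_masked, masked_groups))
def pvStepA (clean : List Char) (length : Int) (st : Int × List (List Char)) (i : Int) :
    Int × List (List Char) :=
  let group_size := min 4 (length - i)
  if group_size ≤ st.1 then
    (st.1 - group_size, st.2 ++ [PySem.List.pyRepeat ['*'] group_size])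
  else if 0 < st.1 then
    (0, st.2 ++ [PySem.List.pyRepeat ['*'] st.1 ++
                 PySem.List.slice clean (some (i + st.1)) (some (i + group_size))])
  else
    (st.1, st.2 ++ [PySem.List.slice clean (some i) (some (i + group_size))])

def mask_card_number (card_number : String) (visible_digits : Int) : String :=
  if card_number.toList = [] then "" else
  let clean : List Char := card_number.toList.filter PySem.Chars.isdigit
  let length : Int := clean.length
  if length < visible_digits then String.ofList clean else
  let visible_part : List Char := PySem.List.slice clean (some (-visible_digits)) none
  if length = 15 then String.ofList ("**** ****** *".toList ++ visible_part) else
  if length = 14 then String.ofList ("**** ****** ".toList ++ visible_part) else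
  if length = 16 then String.ofList ("**** **** **** ".toList ++ visible_part) else
  let masked_length := length - visible_digits
  let res := (PySem.List.pyRange 0 length 4).foldl (pvStepA clean length) (masked_length, [])
  String.ofList (PySem.Chars.join [' '] res.2)

-- ===== PORT B =====
def pvPrefixTable : PySem.Dict Int (List Char) :=
  ((PySem.Dict.empty.insert 15 "**** ****** *".toList).insert 14 "**** ****** ".toList).insert
    16 "**** **** **** ".toList

def mask_card_number_alt (card_number : String) (visible_digits : Int) : String :=
  if card_number.toList = [] then "" else
  let clean : List Char := card_number.toList.filter PySem.Chars.isdigit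
  let length : Int := clean.length
  if length < visible_digits then String.ofList clean else
  match pvPrefixTable.get? length with
  | some pfx => String.ofList (pfx ++ PySem.List.slice clean (some (-visible_digits)) none)
  | none =>
    let masked_length := length - visible_digits
    let s := PySem.List.pyRepeat ['*'] masked_length ++ PySem.List.slice clean (some masked_length) none
    String.ofList (PySem.Chars.join [' ']
      ((PySem.List.pyRange 0 length 4).map (fun i => PySem.List.slice s (some i) (some (i + 4)))))

-- ===== PRECONDITION & SPEC =====
-- Pre_ restricts to the function's natural domain of nonnegative visible-digit counts; for
-- visible_digits < 0 A still returns (an all-masked string), a value outside the task's meaning.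
def Pre_mask_card_number (card_number : String) (visible_digits : Int) : Prop :=
  0 ≤ visible_digits
instance (card_number : String) (visible_digits : Int) : Decidable (Pre_mask_card_number card_number visible_digits) := by unfold Pre_mask_card_number; infer_instance

def pvWitness_mask_card_number : String × Int := ("4111 1111 1111 1111", 4)

def Spec_mask_card_number (card_number : String) (visible_digits : Int) (out : String) : Prop := out = mask_card_number_alt card_number visible_digits
instance (card_number : String) (visible_digits : Int) (out : String) : Decidable (Spec_mask_card_number card_number visible_digits out) := by unfold Spec_mask_card_number; infer_instance

-- ===== CLAIM (what is proved, stated in full; the proofs are below) =====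
def Claim_equal_mask_card_number : Prop := ∀ (card_number : String) (visible_digits : Int), Dom_mask_card_number card_number visible_digits → Pre_mask_card_number card_number visible_digits → Spec_mask_card_number card_number visible_digits (mask_card_number card_number visible_digits)

-- ===== LEMMAS AND PROOFS =====

theorem pyRange_four_nil (a b : Int) (h : b ≤ a) : PySem.List.pyRange a b 4 = [] := by
  rw [PySem.List.pyRange_of_pos a b (by norm_num)]
  simp [if_neg (not_lt.mpr h)]

theorem pyRange_four_cons (a b : Int) (h : a < b) :
    PySem.List.pyRange a b 4 = a :: PySem.List.pyRange (a + 4) b 4 := by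
  rw [PySem.List.pyRange_of_pos a b (by norm_num), PySem.List.pyRange_of_pos (a+4) b (by norm_num)]
  rw [if_pos h]
  by_cases h4 : a + 4 < b
  · rw [if_pos h4]
    have hn : ((b - a + 4 - 1) / 4).toNat = ((b - (a+4) + 4 - 1) / 4).toNat + 1 := by omega
    rw [hn, List.range_succ_eq_map]
    simp only [List.map_cons, List.map_map, Nat.cast_zero, mul_zero, add_zero, List.cons.injEq,
      true_and]
    apply List.map_congr_left
    intro k _
    simp only [Function.comp]
    push_cast
    ring
  · rw [if_neg h4]
    have hn : ((b - a + 4 - 1) / 4).toNat = 1 := by omega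
    rw [hn]
    simp

-- the group A's loop emits at start index a equals chars a..a+4 of the pre-masked string,
-- and remaining_masked = max (r - a) 0 is the loop invariant
theorem stepA_eq (clean : List Char) (r a : Nat) (acc : List (List Char))
    (hr : r ≤ clean.length) (ha : a < clean.length) :
    pvStepA clean (clean.length : Int) (max ((r:Int) - (a:Int)) 0, acc) (a:Int)
    = (max ((r:Int) - ((a:Int) + 4)) 0,
       acc ++ [PySem.List.slice (List.replicate r '*' ++ clean.drop r)
                 (some (a:Int)) (some ((a:Int) + 4))]) := by
  have h4 : (a:Int) + 4 = ((a + 4 : Nat) : Int) := by push_cast; ring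
  have hsl : PySem.List.slice (List.replicate r '*' ++ clean.drop r)
      (some (a:Int)) (some ((a:Int)+4))
      = ((List.replicate r '*' ++ clean.drop r).drop a).take 4 := by
    rw [h4, PySem.List.slice_natCast]
    congr 1
    omega
  rw [hsl]
  unfold pvStepA
  dsimp only
  split_ifs with h1 h2
  all_goals simp only [Prod.mk.injEq]
  · -- remaining_masked covers the whole group: all stars
    have har : a < r := by omega
    refine ⟨by omega, ?_⟩
    congr 1
    rw [PySem.List.pyRepeat_singleton, List.drop_append, List.drop_replicate,
        List.length_replicate]
    have e1 : a - r = 0 := by omega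
    rw [e1, List.drop_zero, List.take_append, List.take_replicate, List.length_replicate]
    by_cases hc : 4 ≤ r - a
    · have e2 : 4 - (r - a) = 0 := by omega
      have e3 : min 4 (r - a) = 4 := by omega
      have e4 : (min (4:Int) ((clean.length : Int) - (a:Int))).toNat = 4 := by omega
      rw [e2, List.take_zero, List.append_nil, e3, e4]
    · have hrn : r = clean.length := by omega
      have e5 : clean.drop r = [] := by
        apply List.drop_eq_nil_of_le
        omega
      rw [e5, List.take_nil, List.append_nil]
      have e6 : (min (4:Int) ((clean.length : Int) - (a:Int))).toNat = min 4 (r - a) := by omega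
      rw [e6]
  · -- remaining_masked splits the group: stars then digits
    have har : a < r := by omega
    have hlt : (r:Int) - (a:Int) < min 4 ((clean.length : Int) - (a:Int)) := by omega
    have hmax : max ((r:Int) - (a:Int)) 0 = (r:Int) - (a:Int) := by omega
    refine ⟨by omega, ?_⟩
    congr 1
    rw [hmax, PySem.List.pyRepeat_singleton]
    have e5 : (a:Int) + ((r:Int) - (a:Int)) = ((r : Nat) : Int) := by ring
    have e6 : (a:Int) + min 4 ((clean.length : Int) - (a:Int))
        = ((min (a + 4) clean.length : Nat) : Int) := by
      push_cast [Nat.cast_min]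
      omega
    rw [e5, e6, PySem.List.slice_natCast]
    rw [List.drop_append, List.drop_replicate, List.length_replicate]
    have e1 : a - r = 0 := by omega
    rw [e1, List.drop_zero, List.take_append, List.take_replicate, List.length_replicate]
    have e7 : ((r:Int) - (a:Int)).toNat = r - a := by omega
    have e8 : min 4 (r - a) = r - a := by omega
    rw [e7, e8]
    congr 1
    by_cases hc : a + 4 ≤ clean.length
    · have e9 : min (a + 4) clean.length - r = 4 - (r - a) := by omega
      rw [e9]
    · rw [List.take_of_length_le (by simp; omega), List.take_of_length_le (by simp; omega)]
  · -- group fully visible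
    have hra : r ≤ a := by omega
    refine ⟨by omega, ?_⟩
    congr 1
    have e6 : (a:Int) + min 4 ((clean.length : Int) - (a:Int))
        = ((min (a + 4) clean.length : Nat) : Int) := by
      push_cast [Nat.cast_min]
      omega
    rw [e6, PySem.List.slice_natCast]
    rw [List.drop_append, List.drop_replicate, List.length_replicate]
    have e1 : r - a = 0 := by omega
    rw [e1, List.replicate_zero, List.nil_append, List.drop_drop]
    have e2 : r + (a - r) = a := by omega
    rw [e2]
    by_cases hc : a + 4 ≤ clean.length
    · have e9 : min (a + 4) clean.length - a = 4 := by omega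
      rw [e9]
    · rw [List.take_of_length_le (by simp; omega), List.take_of_length_le (by simp; omega)]

theorem loop_eq (clean : List Char) (r : Nat) (hr : r ≤ clean.length) :
    ∀ (k a : Nat) (acc : List (List Char)),
    clean.length ≤ a + 4 * k →
    (List.foldl (pvStepA clean (clean.length : Int)) (max ((r:Int) - (a:Int)) 0, acc)
        (PySem.List.pyRange (a:Int) (clean.length : Int) 4)).2
    = acc ++ (PySem.List.pyRange (a:Int) (clean.length : Int) 4).map
        (fun i => PySem.List.slice (List.replicate r '*' ++ clean.drop r) (some i) (some (i+4))) := by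
  intro k
  induction k with
  | zero =>
    intro a acc hk
    rw [pyRange_four_nil _ _ (by omega)]
    simp
  | succ k ih =>
    intro a acc hk
    by_cases hlt : (a:Int) < (clean.length : Int)
    · rw [pyRange_four_cons _ _ hlt]
      simp only [List.foldl_cons, List.map_cons]
      rw [stepA_eq clean r a acc hr (by exact_mod_cast hlt)]
      have h4 : (a:Int) + 4 = ((a + 4 : Nat) : Int) := by push_cast; ring
      rw [h4, ih (a+4) _ (by omega)]
      simp
    · rw [pyRange_four_nil _ _ (by omega)]
      simp

-- the whole fallback branch: A's loop result = B's chunked pre-masked string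
theorem fallback_eq (clean : List Char) (v : Int) (h0 : 0 ≤ v) (hle : v ≤ (clean.length : Int)) :
    ((PySem.List.pyRange 0 (clean.length : Int) 4).foldl (pvStepA clean (clean.length : Int))
        ((clean.length : Int) - v, [])).2
    = (PySem.List.pyRange 0 (clean.length : Int) 4).map
        (fun i => PySem.List.slice
          (PySem.List.pyRepeat ['*'] ((clean.length : Int) - v) ++
           PySem.List.slice clean (some ((clean.length : Int) - v)) none)
          (some i) (some (i + 4))) := by
  have hr : (((clean.length : Int) - v).toNat : Int) = (clean.length : Int) - v := by omega
  rw [← hr, PySem.List.pyRepeat_singleton, PySem.List.slice_from_natCast]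
  simp only [Int.toNat_natCast]
  have h := loop_eq clean (((clean.length : Int) - v).toNat) (by omega) clean.length 0 [] (by omega)
  simp only [Nat.cast_zero, sub_zero, List.nil_append] at h
  rw [max_eq_left (Int.natCast_nonneg _)] at h
  exact h

-- ===== VERDICT (by name: the statement is the Claim_ definition above) =====
theorem mask_card_number_spec : Claim_equal_mask_card_number := by
  intro card_number v _hd hpre
  unfold Spec_mask_card_number mask_card_number mask_card_number_alt
  by_cases hemp : card_number.toList = []
  · simp [hemp]
  rw [if_neg hemp, if_neg hemp]
  set clean : List Char := card_number.toList.filter PySem.Chars.isdigit with hclean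
  by_cases hsmall : (clean.length : Int) < v
  · rw [if_pos hsmall, if_pos hsmall]
  rw [if_neg hsmall, if_neg hsmall]
  by_cases h15 : (clean.length : Int) = 15
  · rw [if_pos h15]
    have : pvPrefixTable.get? (clean.length : Int) = some ("**** ****** *".toList) := by
      rw [h15]; rfl
    rw [this]
  rw [if_neg h15]
  by_cases h14 : (clean.length : Int) = 14
  · rw [if_pos h14]
    have : pvPrefixTable.get? (clean.length : Int) = some ("**** ****** ".toList) := by
      rw [h14]; rfl
    rw [this]
  rw [if_neg h14]
  by_cases h16 : (clean.length : Int) = 16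
  · rw [if_pos h16]
    have : pvPrefixTable.get? (clean.length : Int) = some ("**** **** **** ".toList) := by
      rw [h16]; rfl
    rw [this]
  rw [if_neg h16]
  have hnone : pvPrefixTable.get? (clean.length : Int) = none := by
    have e : pvPrefixTable = PySem.Dict.mk
        [(15, "**** ****** *".toList), (14, "**** ****** ".toList),
         (16, "**** **** **** ".toList)] := by rfl
    rw [e, PySem.Dict.get?_mk_cons, PySem.Dict.get?_mk_cons, PySem.Dict.get?_mk_cons]
    simp [Ne.symm h15, Ne.symm h14, Ne.symm h16, PySem.Dict.get?]
  rw [hnone]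
  simp only []
  rw [fallback_eq clean v hpre (by omega)]
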